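-- pv_equiv track=rewrite | github.com/JasonLee925/information-retrieval-practice | q2_3.py | doc_at_a_time
-- ===== SOURCE A (Python) =====
-- def doc_at_a_time(I, Q):
--     R = {}
--     for i_doc, i_term_vals in I.items():
--         R[i_doc] = 0
--         for q_term, q_freq in Q.items():
--             if q_term in i_term_vals.keys():
--                 # if a query's term is present in a document
--                 f = i_term_vals[q_term]
--                 q = q_freq
--                 R[i_doc] = R[i_doc] + f * q # the god damn equation
--     return R
-- ===== SOURCE B (Python) =====
-- def doc_at_a_time(I, Q):
--     # term-at-a-time scoring over an inverted index
--     index = {}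
--     for doc, term_vals in I.items():
--         for term, freq in term_vals.items():
--             index.setdefault(term, []).append((doc, freq))
--     R = {doc: 0 for doc in I}
--     for q_term, q_freq in Q.items():
--         if q_term in index:
--             for doc, f in index[q_term]:
--                 R[doc] = R[doc] + f * q_freq
--     return R
-- ===== Notes on version B (the rewrite author's own statement) =====
-- stated objective: faster
-- what changed: Replaces the document-at-a-time nested scan (for each document, probe every query term against its term dict) by a term-at-a-time evaluation over an inverted index built in one pass, seeding every document score with 0, so work is proportional to postings plus actual matches instead of documents times query terms.
import Mathlib
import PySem

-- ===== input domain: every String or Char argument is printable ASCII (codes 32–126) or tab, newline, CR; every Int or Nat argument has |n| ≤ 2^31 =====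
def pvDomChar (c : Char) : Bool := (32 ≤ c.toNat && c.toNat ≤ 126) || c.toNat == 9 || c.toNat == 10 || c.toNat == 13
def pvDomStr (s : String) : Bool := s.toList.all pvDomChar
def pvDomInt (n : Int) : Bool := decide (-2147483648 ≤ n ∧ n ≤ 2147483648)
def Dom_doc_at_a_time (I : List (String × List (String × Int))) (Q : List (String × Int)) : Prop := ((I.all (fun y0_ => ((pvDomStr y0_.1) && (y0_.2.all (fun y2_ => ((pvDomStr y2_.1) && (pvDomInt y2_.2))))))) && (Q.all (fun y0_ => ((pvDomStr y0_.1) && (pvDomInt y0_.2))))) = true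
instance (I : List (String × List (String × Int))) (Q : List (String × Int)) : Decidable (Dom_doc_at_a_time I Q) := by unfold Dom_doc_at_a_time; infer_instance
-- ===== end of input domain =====

-- B replaces A's document-at-a-time nested scan by term-at-a-time scoring over an inverted index (measured faster in a timing run; same results).

-- ===== PORT A =====
def doc_at_a_time (I : List (String × List (String × Int))) (Q : List (String × Int)) : List (String × Int) :=
  (I.foldl (fun R e =>
      Q.foldl (fun R q =>
          if (PySem.Dict.mk e.2).contains q.1 then
            R.insert e.1 (R.getD e.1 0 + (PySem.Dict.mk e.2).getD q.1 0 * q.2)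
          else R)
        (R.insert e.1 0))
    PySem.Dict.empty).items

-- ===== PORT B =====
def doc_at_a_time_alt (I : List (String × List (String × Int))) (Q : List (String × Int)) : List (String × Int) :=
  let index : PySem.Dict String (List (String × Int)) :=
    I.foldl (fun idx e =>
        e.2.foldl (fun idx p => idx.modify p.1 [] (fun l => l ++ [(e.1, p.2)])) idx)
      PySem.Dict.empty
  let R0 : PySem.Dict String Int :=
    I.foldl (fun R e => R.insert e.1 0) PySem.Dict.empty
  (Q.foldl (fun R q =>
      if index.contains q.1 then
        (index.getD q.1 []).foldl (fun R p => R.insert p.1 (R.getD p.1 0 + p.2 * q.2)) R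
      else R)
    R0).items

-- ===== PRECONDITION & SPEC =====
-- Pre_ excludes association lists with duplicate document keys or duplicate term keys inside a document: such lists
-- cannot arise from the Python dicts A receives, and A's reset/last-wins behaviour there is accidental.
def Pre_doc_at_a_time (I : List (String × List (String × Int))) (Q : List (String × Int)) : Prop :=
  (I.map Prod.fst).Nodup ∧ ∀ p ∈ I, (p.2.map Prod.fst).Nodup
instance (I : List (String × List (String × Int))) (Q : List (String × Int)) : Decidable (Pre_doc_at_a_time I Q) := by unfold Pre_doc_at_a_time; infer_instance
def pvWitness_doc_at_a_time : (List (String × List (String × Int))) × (List (String × Int)) :=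
  ([("d1", [("a", 2), ("b", 1)]), ("d2", [("b", 3)])], [("a", 1), ("b", 2)])
def Spec_doc_at_a_time (I : List (String × List (String × Int))) (Q : List (String × Int)) (out : List (String × Int)) : Prop := out = doc_at_a_time_alt I Q
instance (I : List (String × List (String × Int))) (Q : List (String × Int)) (out : List (String × Int)) : Decidable (Spec_doc_at_a_time I Q out) := by unfold Spec_doc_at_a_time; infer_instance

-- ===== CLAIM (what is proved, stated in full; the proofs are below) =====
def Claim_equal_doc_at_a_time : Prop := ∀ (I : List (String × List (String × Int))) (Q : List (String × Int)), Dom_doc_at_a_time I Q → Pre_doc_at_a_time I Q → Spec_doc_at_a_time I Q (doc_at_a_time I Q)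

-- ===== LEMMAS AND PROOFS =====
def pvContrib (tv : List (String × Int)) (q : String × Int) : Int :=
  if (PySem.Dict.mk tv).contains q.1 then (PySem.Dict.mk tv).getD q.1 0 * q.2 else 0

def pvScore (tv : List (String × Int)) (Q : List (String × Int)) : Int :=
  (Q.map (pvContrib tv)).sum

def pvPostings (I : List (String × List (String × Int))) (t : String) : List (String × Int) :=
  I.flatMap (fun e => (e.2.filter (fun p => p.1 == t)).map (fun p => (e.1, p.2)))

-- A inner loop
theorem A_inner (tv : List (String × Int)) (d : String) :
    ∀ (Q : List (String × Int)) (R : PySem.Dict String Int) (v : Int),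
    Q.foldl (fun R q =>
        if (PySem.Dict.mk tv).contains q.1 then
          R.insert d (R.getD d 0 + (PySem.Dict.mk tv).getD q.1 0 * q.2)
        else R) (R.insert d v)
      = R.insert d (v + pvScore tv Q) := by
  intro Q
  induction Q with
  | nil => intro R v; simp [pvScore]
  | cons q Q ih =>
    intro R v
    simp only [List.foldl_cons]
    by_cases h : (PySem.Dict.mk tv).contains q.1
    · rw [if_pos h, PySem.Dict.getD_insert_self, PySem.Dict.insert_insert_self, ih]
      have : pvContrib tv q = (PySem.Dict.mk tv).getD q.1 0 * q.2 := by simp [pvContrib, h]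
      simp only [pvScore, List.map_cons, List.sum_cons, this]
      congr 1; ring
    · rw [if_neg h, ih]
      have : pvContrib tv q = 0 := by simp [pvContrib, h]
      simp [pvScore, this]

-- A outer loop
theorem A_outer (Q : List (String × Int)) :
    ∀ (I : List (String × List (String × Int))) (R : PySem.Dict String Int),
    (∀ e ∈ I, R.contains e.1 = false) → (I.map Prod.fst).Nodup →
    (I.foldl (fun R e =>
        Q.foldl (fun R q =>
            if (PySem.Dict.mk e.2).contains q.1 then
              R.insert e.1 (R.getD e.1 0 + (PySem.Dict.mk e.2).getD q.1 0 * q.2)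
            else R)
          (R.insert e.1 0)) R).items
      = R.items ++ I.map (fun e => (e.1, pvScore e.2 Q)) := by
  intro I
  induction I with
  | nil => intro R _ _; simp
  | cons e I ih =>
    intro R hfresh hnd
    simp only [List.foldl_cons]
    rw [A_inner e.2 e.1 Q R 0]
    have hRe : R.contains e.1 = false := hfresh e (by simp)
    have hnd' : (e.1 :: I.map Prod.fst).Nodup := by simpa using hnd
    have hmem : e.1 ∉ I.map Prod.fst := (List.nodup_cons.mp hnd').1
    rw [ih]
    · rw [PySem.Dict.items_insert_of_not_contains _ _ hRe]
      simp
    · intro e' he'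
      rw [PySem.Dict.contains_insert]
      have h1 : (e'.1 == e.1) = false := by
        simp only [beq_eq_false_iff_ne, ne_eq]
        intro h; exact hmem (h ▸ List.mem_map_of_mem he')
      simp [h1, hfresh e' (by simp [he'])]
    · exact (List.nodup_cons.mp hnd').2

-- index build: value at a key, inner loop
theorem idx_inner_getD (d : String) (tv : List (String × Int))
    (idx : PySem.Dict String (List (String × Int))) (t : String) :
    (tv.foldl (fun idx p => idx.modify p.1 [] (fun l => l ++ [(d, p.2)])) idx).getD t []
      = idx.getD t [] ++ (tv.filter (fun p => p.1 == t)).map (fun p => (d, p.2)) := by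
  have h := PySem.Dict.getD_foldl_modify_append (tv.map (fun p => (p.1, (d, p.2)))) idx t
  rw [List.foldl_map] at h
  rw [h, List.filter_map, List.map_map]
  simp [Function.comp_def]
theorem idx_getD :
    ∀ (I : List (String × List (String × Int))) (idx : PySem.Dict String (List (String × Int))) (t : String),
    (I.foldl (fun idx e =>
        e.2.foldl (fun idx p => idx.modify p.1 [] (fun l => l ++ [(e.1, p.2)])) idx) idx).getD t []
      = idx.getD t [] ++ pvPostings I t := by
  intro I
  induction I with
  | nil => intro idx t; simp [pvPostings]
  | cons e I ih =>
    intro idx t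
    simp only [List.foldl_cons]
    rw [ih, idx_inner_getD]
    simp [pvPostings]
theorem idx_inner_contains (d : String) (tv : List (String × Int)) :
    ∀ (idx : PySem.Dict String (List (String × Int))) (t : String),
    (tv.foldl (fun idx p => idx.modify p.1 [] (fun l => l ++ [(d, p.2)])) idx).contains t
      = (idx.contains t || tv.any (fun p => p.1 == t)) := by
  induction tv with
  | nil => intro idx t; simp
  | cons p tv ih =>
    intro idx t
    simp only [List.foldl_cons, List.any_cons]
    rw [ih, PySem.Dict.contains_modify]
    by_cases h : t = p.1
    · subst h; simp
    · have h2 : p.1 ≠ t := fun hh => h hh.symm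
      have hb : (t == p.1) = false := beq_eq_false_iff_ne.mpr h
      have hb2 : (p.1 == t) = false := beq_eq_false_iff_ne.mpr h2
      simp [hb, hb2]
theorem idx_contains :
    ∀ (I : List (String × List (String × Int))) (idx : PySem.Dict String (List (String × Int))) (t : String),
    (I.foldl (fun idx e =>
        e.2.foldl (fun idx p => idx.modify p.1 [] (fun l => l ++ [(e.1, p.2)])) idx) idx).contains t
      = (idx.contains t || I.any (fun e => e.2.any (fun p => p.1 == t))) := by
  intro I
  induction I with
  | nil => intro idx t; simp
  | cons e I ih =>
    intro idx t
    simp only [List.foldl_cons, List.any_cons]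
    rw [ih, idx_inner_contains]
    simp [Bool.or_assoc]

-- the matching entries of a nodup-keyed term list
theorem filter_char (t : String) :
    ∀ (tv : List (String × Int)), (tv.map Prod.fst).Nodup →
    tv.filter (fun p => p.1 == t)
      = if (PySem.Dict.mk tv).contains t then [(t, (PySem.Dict.mk tv).getD t 0)] else [] := by
  intro tv
  induction tv with
  | nil => intro _; simp [PySem.Dict.contains]
  | cons a tv ih =>
    intro hnd
    have hnd' : (a.1 :: tv.map Prod.fst).Nodup := by simpa using hnd
    by_cases h : a.1 = t
    · subst h
      have : tv.filter (fun p => p.1 == a.1) = [] := by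
        rw [List.filter_eq_nil_iff]
        intro p hp hb
        exact (List.nodup_cons.mp hnd').1 ((beq_iff_eq.mp hb) ▸ List.mem_map_of_mem hp)
      simp [List.filter_cons, this, PySem.Dict.contains, PySem.Dict.getD, PySem.Dict.get?]
    · have hb : (a.1 == t) = false := beq_eq_false_iff_ne.mpr h
      rw [List.filter_cons]
      simp only [hb, Bool.false_eq_true, if_false]
      rw [ih (List.nodup_cons.mp hnd').2]
      simp only [PySem.Dict.contains, PySem.Dict.getD, PySem.Dict.get?,
        List.any_cons, List.find?_cons, hb]
      rw [Bool.false_or]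

-- inserting at the head key of a dict whose tail keys differ
theorem insert_head (d : String) (v w : Int) (L : List (String × Int)) (h : d ∉ L.map Prod.fst) :
    (PySem.Dict.mk ((d, v) :: L)).insert d w = PySem.Dict.mk ((d, w) :: L) := by
  have hc : (PySem.Dict.mk ((d, v) :: L)).contains d = true := by
    simp [PySem.Dict.contains]
  simp only [PySem.Dict.insert, hc, if_true]
  congr 1
  simp only [List.map_cons, beq_self_eq_true, if_true]
  congr 1
  have hL : ∀ p ∈ L, (if (p.1 == d) = true then (d, w) else p) = p := by
    intro p hp
    have : (p.1 == d) = false :=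
      beq_eq_false_iff_ne.mpr (fun hh => h (hh ▸ List.mem_map_of_mem hp))
    simp [this]
  rw [List.map_congr_left hL]
  exact List.map_id' _ -- id lambda form

-- an update whose key differs from the head passes through the head entry
theorem step_commute (qf : Int) (d : String) (v : Int) (L : List (String × Int))
    (p : String × Int) (h : p.1 ≠ d) :
    (PySem.Dict.mk ((d, v) :: L)).insert p.1 ((PySem.Dict.mk ((d, v) :: L)).getD p.1 0 + p.2 * qf)
      = PySem.Dict.mk ((d, v) ::
          ((PySem.Dict.mk L).insert p.1 ((PySem.Dict.mk L).getD p.1 0 + p.2 * qf)).items) := by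
  have hb : (d == p.1) = false := beq_eq_false_iff_ne.mpr (fun hh => h hh.symm)
  have hg : (PySem.Dict.mk ((d, v) :: L)).getD p.1 0 = (PySem.Dict.mk L).getD p.1 0 := by
    simp [PySem.Dict.getD, PySem.Dict.get?, List.find?_cons, hb]
  rw [hg]
  by_cases hc : (PySem.Dict.mk L).contains p.1
  · have hc' : (PySem.Dict.mk ((d, v) :: L)).contains p.1 = true := by
      simp [PySem.Dict.contains] at hc ⊢; exact Or.inr hc
    simp only [PySem.Dict.insert, hc, hc', if_true]
    congr 1
    simp only [List.map_cons, hb, Bool.false_eq_true, if_false]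
  · have hcb : (PySem.Dict.mk L).contains p.1 = false := by rwa [Bool.not_eq_true] at hc
    have hc' : (PySem.Dict.mk ((d, v) :: L)).contains p.1 = false := by
      simp only [PySem.Dict.contains, List.any_cons, hb, Bool.false_or]
      simpa only [PySem.Dict.contains] using hcb
    simp only [PySem.Dict.insert, hcb, hc', Bool.false_eq_true, if_false]
    rw [List.cons_append]

-- a run of updates over keys all different from the head passes through the head entry
theorem B_skip (qf : Int) :
    ∀ (ps : List (String × Int)) (L : List (String × Int)) (d : String) (v : Int),
    (∀ p ∈ ps, p.1 ≠ d) →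
    ps.foldl (fun R p => R.insert p.1 (R.getD p.1 0 + p.2 * qf)) (PySem.Dict.mk ((d, v) :: L))
      = PySem.Dict.mk ((d, v) ::
          (ps.foldl (fun R p => R.insert p.1 (R.getD p.1 0 + p.2 * qf)) (PySem.Dict.mk L)).items) := by
  intro ps
  induction ps with
  | nil => intro L d v _; rfl
  | cons p ps ih =>
    intro L d v hne
    simp only [List.foldl_cons]
    rw [step_commute qf d v L p (hne p (by simp))]
    rw [ih _ d v (fun p hp => hne p (by simp [hp]))]

-- every posting's document key comes from I
theorem postings_keys (I : List (String × List (String × Int))) (t : String) :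
    ∀ p ∈ pvPostings I t, p.1 ∈ I.map Prod.fst := by
  intro p hp
  simp only [pvPostings, List.mem_flatMap, List.mem_map] at hp
  obtain ⟨e, he, q, _, hq⟩ := hp
  exact hq ▸ List.mem_map_of_mem he

-- the posting run of one query term adds its contribution to every document score
theorem B_post (t : String) (qf : Int) :
    ∀ (I : List (String × List (String × Int))) (v : (String × List (String × Int)) → Int),
    (I.map Prod.fst).Nodup → (∀ e ∈ I, (e.2.map Prod.fst).Nodup) →
    (pvPostings I t).foldl (fun R p => R.insert p.1 (R.getD p.1 0 + p.2 * qf))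
        (PySem.Dict.mk (I.map (fun e => (e.1, v e))))
      = PySem.Dict.mk (I.map (fun e => (e.1, v e + pvContrib e.2 (t, qf)))) := by
  intro I
  induction I with
  | nil => intro v _ _; simp [pvPostings]
  | cons e I ih =>
    intro v hnd hin
    have hnd' : (e.1 :: I.map Prod.fst).Nodup := by simpa using hnd
    have hmem : e.1 ∉ I.map Prod.fst := (List.nodup_cons.mp hnd').1
    have hpost : pvPostings (e :: I) t
        = (e.2.filter (fun p => p.1 == t)).map (fun p => (e.1, p.2)) ++ pvPostings I t := by
      simp [pvPostings]
    rw [hpost, List.foldl_append, filter_char t e.2 (hin e (by simp))]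
    have hkeys : ∀ p ∈ pvPostings I t, p.1 ≠ e.1 := by
      intro p hp hpe
      exact hmem (hpe ▸ postings_keys I t p hp)
    by_cases hc : (PySem.Dict.mk e.2).contains t
    · rw [if_pos hc]
      simp only [List.map_cons, List.map_nil, List.foldl_cons, List.foldl_nil]
      have hgd : (PySem.Dict.mk ((e.1, v e) :: I.map (fun e => (e.1, v e)))).getD e.1 0 = v e := by
        simp [PySem.Dict.getD, PySem.Dict.get?]
      rw [List.map_cons] at *
      rw [hgd, insert_head e.1 (v e) _ _ (by simpa using hmem)]
      rw [B_skip qf _ _ _ _ hkeys, ih v hnd'.of_cons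
        (fun e' he' => hin e' (by simp [he']))]
      have : v e + (PySem.Dict.mk e.2).getD t 0 * qf = v e + pvContrib e.2 (t, qf) := by
        simp [pvContrib, hc]
      rw [this]
    · rw [if_neg hc]
      simp only [List.map_nil, List.foldl_nil, List.map_cons]
      rw [B_skip qf _ _ _ _ hkeys, ih v hnd'.of_cons
        (fun e' he' => hin e' (by simp [he']))]
      have : v e = v e + pvContrib e.2 (t, qf) := by simp [pvContrib, hc]
      rw [← this]

-- the term-at-a-time query loop accumulates the full score of every document
theorem B_main (I : List (String × List (String × Int)))
    (hnd : (I.map Prod.fst).Nodup) (hin : ∀ e ∈ I, (e.2.map Prod.fst).Nodup) :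
    ∀ (Q : List (String × Int)) (v : (String × List (String × Int)) → Int),
    Q.foldl (fun R q =>
        if (I.foldl (fun idx e =>
              e.2.foldl (fun idx p => idx.modify p.1 [] (fun l => l ++ [(e.1, p.2)])) idx)
            PySem.Dict.empty).contains q.1 then
          ((I.foldl (fun idx e =>
              e.2.foldl (fun idx p => idx.modify p.1 [] (fun l => l ++ [(e.1, p.2)])) idx)
            PySem.Dict.empty).getD q.1 []).foldl
            (fun R p => R.insert p.1 (R.getD p.1 0 + p.2 * q.2)) R
        else R)
      (PySem.Dict.mk (I.map (fun e => (e.1, v e))))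
      = PySem.Dict.mk (I.map (fun e => (e.1, v e + pvScore e.2 Q))) := by
  intro Q
  induction Q with
  | nil => intro v; simp [pvScore]
  | cons q Q ih =>
    intro v
    simp only [List.foldl_cons]
    by_cases hc : (I.foldl (fun idx e =>
        e.2.foldl (fun idx p => idx.modify p.1 [] (fun l => l ++ [(e.1, p.2)])) idx)
        PySem.Dict.empty).contains q.1
    · rw [if_pos hc, idx_getD I PySem.Dict.empty q.1]
      simp only [PySem.Dict.getD_empty]
      rw [List.nil_append, B_post q.1 q.2 I v hnd hin, ih (fun e => v e + pvContrib e.2 (q.1, q.2))]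
      congr 1
      apply List.map_congr_left
      intro e he
      simp only [pvScore, List.map_cons, List.sum_cons]
      congr 1
      ring
    · rw [if_neg hc]
      rw [ih v]
      congr 1
      apply List.map_congr_left
      intro e he
      have hfalse : (PySem.Dict.mk e.2).contains q.1 = false := by
        rw [idx_contains I PySem.Dict.empty q.1] at hc
        simp only [PySem.Dict.contains_empty, Bool.false_or, Bool.not_eq_true, List.any_eq_false] at hc
        simp only [PySem.Dict.contains, List.any_eq_false]
        intro p hp
        simp [hc e he p hp]
      simp only [pvScore, List.map_cons, List.sum_cons]
      have : pvContrib e.2 (q.1, q.2) = 0 := by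
        simp [pvContrib, hfalse]
      have hq : pvContrib e.2 q = 0 := by
        rw [show q = (q.1, q.2) from rfl] at *; exact this
      simp [hq]

theorem R0_eq (I : List (String × List (String × Int))) (hnd : (I.map Prod.fst).Nodup) :
    I.foldl (fun R e => R.insert e.1 (0 : Int)) PySem.Dict.empty
      = PySem.Dict.mk (I.map (fun e => (e.1, (0 : Int)))) := by
  apply PySem.Dict.ext
  rw [PySem.Dict.items_foldl_insert_fresh I (fun e => e.1) (fun _ => 0) PySem.Dict.empty
    (fun a _ => PySem.Dict.contains_empty _) (by simpa using hnd)]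
  simp [PySem.Dict.empty]

-- ===== VERDICT (by name: the statement is the Claim_ definition above) =====
theorem doc_at_a_time_spec : Claim_equal_doc_at_a_time := by
  intro I Q _ hpre
  obtain ⟨h1, h2⟩ := hpre
  unfold Spec_doc_at_a_time doc_at_a_time doc_at_a_time_alt
  rw [A_outer Q I PySem.Dict.empty (fun e _ => PySem.Dict.contains_empty _) h1]
  simp only []
  rw [R0_eq I h1, B_main I h1 h2 Q (fun _ => 0)]
  simp [PySem.Dict.empty]
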